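-- pv_equiv track=rewrite | github.com/ravish-oo/arc-agi-oo | src/signature_builders.py | colmod_mask
-- ===== SOURCE A (Python) =====
-- def _validate_rectangular(g: list[list[int]]) -> None:
--     """
--     Validate that grid g is rectangular (all rows same length).
--
--     Raises:
--         ValueError: If g is ragged (rows have different lengths).
--
--     Note: Empty grid [] is valid (0 rows).
--     """
--     if not g:
--         return  # Empty grid is valid
--
--     width = len(g[0])
--     for i, row in enumerate(g):
--         if len(row) != width:
--             raise ValueError(
--                 f"Ragged grid: row {i} has length {len(row)}, expected {width}"
--             )
--
-- def colmod_mask(g: list[list[int]], k: int) -> list[list[list[int]]]: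
--     """
--     Compute column modulo partition: vertical bands based on c mod k.
--
--     Returns k disjoint 0/1 masks [M0, M1, ..., M{k-1}] where:
--     - Mi[r][c] == 1 iff c mod k == i
--
--     Properties:
--     - Disjoint: only one Mi[r][c] == 1 for each (r,c)
--     - Cover: ∑Mi == ones(shape)
--     - Input-only: depends on column index c, not grid values
--
--     Args:
--         g: Input grid (list of lists of ints)
--         k: Modulo value, must be in {2, 3}
--
--     Returns:
--         List of k masks [M0, M1, ..., M{k-1}], each with shape == shape(g)
--
--     Raises:
--         ValueError: If g is ragged or k not in {2, 3}
--
--     Examples: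
--         >>> colmod_mask([], 2)
--         [[], []]
--
--         >>> colmod_mask([[1]], 2)
--         [[[1]], [[0]]]
--
--         >>> colmod_mask([[1, 2, 3], [4, 5, 6]], 3)
--         [[[1, 0, 0], [1, 0, 0]],
--          [[0, 1, 0], [0, 1, 0]],
--          [[0, 0, 1], [0, 0, 1]]]
--     """
--     _validate_rectangular(g)
--
--     if k not in {2, 3}:
--         raise ValueError(f"k must be in {{2, 3}}, got {k}")
--
--     if not g:
--         # Return k empty masks
--         return [[] for _ in range(k)]
--
--     h = len(g)
--     w = len(g[0])
--
--     # Initialize k masks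
--     masks = [[[0] * w for _ in range(h)] for _ in range(k)]
--
--     # Fill masks based on c mod k
--     for r in range(h):
--         for c in range(w):
--             residue = c % k
--             masks[residue][r][c] = 1
--
--     return masks
-- ===== SOURCE B (Python) =====
-- def _validate_rectangular(g: list[list[int]]) -> None:
--     if not g:
--         return
--     width = len(g[0])
--     for i, row in enumerate(g):
--         if len(row) != width:
--             raise ValueError(
--                 f"Ragged grid: row {i} has length {len(row)}, expected {width}"
--             )
--
-- def colmod_mask(g: list[list[int]], k: int) -> list[list[list[int]]]:
--     """Periodic tiling: mask i's row is the period-k unit pattern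
--     [0]*i + [1] + [0]*(k-1-i) tiled across the width and truncated, then
--     copied down the h rows; no per-cell residue test, no scatter writes."""
--     _validate_rectangular(g)
--     if k not in {2, 3}:
--         raise ValueError(f"k must be in {{2, 3}}, got {k}")
--     if not g:
--         return [[] for _ in range(k)]
--     h = len(g)
--     w = len(g[0])
--     reps = w // k + 1
--     masks = []
--     for i in range(k):
--         row = (([0] * i + [1] + [0] * (k - 1 - i)) * reps)[:w]
--         masks.append([row[:] for _ in range(h)])
--     return masks
-- ===== Notes on version B (the rewrite author's own statement) =====
-- stated objective: alternative
-- what changed: A scatter-fills k shared zero-initialised h*w masks in one pass over all cells (masks[c % k][r][c] = 1); B never tests a residue per cell: it tiles the period-k unit pattern [0]*i+[1]+[0]*(k-1-i) across the width, truncates it to w, and copies that one row down the h rows of mask i.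
import Mathlib
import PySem

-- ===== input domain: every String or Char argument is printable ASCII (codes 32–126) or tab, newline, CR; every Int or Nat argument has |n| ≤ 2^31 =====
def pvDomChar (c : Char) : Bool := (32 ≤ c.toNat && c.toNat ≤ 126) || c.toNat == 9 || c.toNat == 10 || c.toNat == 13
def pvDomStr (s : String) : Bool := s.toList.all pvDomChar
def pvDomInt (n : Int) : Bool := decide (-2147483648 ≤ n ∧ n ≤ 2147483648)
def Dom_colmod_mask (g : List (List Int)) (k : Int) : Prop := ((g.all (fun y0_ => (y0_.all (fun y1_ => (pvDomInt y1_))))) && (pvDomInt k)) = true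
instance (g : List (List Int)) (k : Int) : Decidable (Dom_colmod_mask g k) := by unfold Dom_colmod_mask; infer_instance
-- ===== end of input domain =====

-- B replaces A's per-cell scatter pass (masks[c % k][r][c] = 1 into k shared
-- zero-initialised masks) by periodic tiling: each mask's row is the period-k
-- unit pattern tiled across the width, truncated, and copied down the rows;
-- objective: alternative construction, no per-cell residue test.
-- A raises ValueError on ragged grids and on k ∉ {2,3}; those inputs are
-- outside Pre_colmod_mask and both ports return [] there.

-- ===== PORT A =====
-- _validate_rectangular: all rows have the length of row 0
def pvRect (g : List (List Int)) : Bool :=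
  g.all (fun row => row.length == (g.headD []).length)

def colmod_mask (g : List (List Int)) (k : Int) : List (List (List Int)) :=
  if ¬ pvRect g then []                 -- A raises ValueError (excluded by Pre_)
  else if ¬ (k = 2 ∨ k = 3) then []     -- A raises ValueError (excluded by Pre_)
  else if g = [] then (List.range k.toNat).map (fun _ => ([] : List (List Int)))
  else
    let h := g.length
    let w := (g.headD []).length
    -- masks = [[[0]*w for _ in range(h)] for _ in range(k)]
    let masks := (List.range k.toNat).map
      (fun _ => (List.range h).map (fun _ => List.replicate w (0 : Int)))
    -- for r in range(h): for c in range(w): masks[c % k][r][c] = 1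
    -- (c ≥ 0 and k ∈ {2,3} here, so Python's c % k is exactly Nat mod c k.toNat)
    (List.range h).foldl (fun masks r =>
      (List.range w).foldl (fun masks c =>
        masks.modify (c % k.toNat) (fun m => m.modify r (fun row => row.set c 1))) masks) masks

-- ===== PORT B =====
def colmod_mask_alt (g : List (List Int)) (k : Int) : List (List (List Int)) :=
  if ¬ pvRect g then []                 -- B raises ValueError (excluded by Pre_)
  else if ¬ (k = 2 ∨ k = 3) then []     -- B raises ValueError (excluded by Pre_)
  else if g = [] then (List.range k.toNat).map (fun _ => ([] : List (List Int)))
  else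
    let h := g.length
    let w := (g.headD []).length
    -- reps = w // k + 1  (w ≥ 0, k > 0 here: Python // is exactly Nat division)
    let reps := w / k.toNat + 1
    -- row = (([0]*i + [1] + [0]*(k-1-i)) * reps)[:w]; [row[:] for _ in range(h)]
    -- (w ≥ 0, so the slice [:w] is exactly List.take w)
    (List.range k.toNat).map (fun i =>
      let row := ((List.replicate reps
        (List.replicate i (0 : Int) ++ 1 :: List.replicate (k.toNat - 1 - i) 0)).flatten).take w
      (List.range h).map (fun _ => row))

-- ===== PRECONDITION & SPEC =====
-- Pre_ excludes exactly the inputs on which A raises ValueError: ragged grids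
-- and k outside {2, 3}.
def Pre_colmod_mask (g : List (List Int)) (k : Int) : Prop :=
  pvRect g = true ∧ (k = 2 ∨ k = 3)
instance (g : List (List Int)) (k : Int) : Decidable (Pre_colmod_mask g k) := by
  unfold Pre_colmod_mask; infer_instance

def pvWitness_colmod_mask : List (List Int) × Int := ([[1, 2, 3], [4, 5, 6]], 2)

def Spec_colmod_mask (g : List (List Int)) (k : Int) (out : List (List (List Int))) : Prop := out = colmod_mask_alt g k
instance (g : List (List Int)) (k : Int) (out : List (List (List Int))) : Decidable (Spec_colmod_mask g k out) := by unfold Spec_colmod_mask; infer_instance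

-- ===== CLAIM (what is proved, stated in full; the proofs are below) =====
def Claim_equal_colmod_mask : Prop := ∀ (g : List (List Int)) (k : Int), Dom_colmod_mask g k → Pre_colmod_mask g k → Spec_colmod_mask g k (colmod_mask g k)

-- ===== LEMMAS AND PROOFS =====

-- the per-row filtered fill A performs for mask i at row r
def pvRowFold (K i : Nat) (cs : List Nat) (row : List Int) : List Int :=
  cs.foldl (fun row c => if c % K = i then row.set c 1 else row) row

theorem pvModify_id {α : Type} (l : List α) (i : Nat) :
    l.modify i (fun x => x) = l := by
  apply List.ext_getElem?
  intro j
  rw [List.getElem?_modify]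
  cases l[j]? <;> simp <;> split <;> rfl

theorem pvRowFold_getElem? (K i : Nat) (cs : List Nat) (row : List Int)
    (hc : ∀ c ∈ cs, c < row.length) (j : Nat) :
    (pvRowFold K i cs row)[j]? =
      if j ∈ cs ∧ j % K = i then some 1 else row[j]? := by
  induction cs generalizing row with
  | nil => simp [pvRowFold]
  | cons c cs ih =>
      simp only [pvRowFold, List.foldl_cons] at ih ⊢
      have hc' : ∀ c' ∈ cs, c' < row.length :=
        fun c' h => hc c' (List.mem_cons_of_mem _ h)
      by_cases hres : c % K = i
      · rw [if_pos hres, ih _ (by simpa using hc')]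
        by_cases hmem : j ∈ cs ∧ j % K = i
        · simp [hmem]
        · rw [if_neg hmem, List.getElem?_set]
          by_cases hjc : c = j
          · subst hjc
            simp [hc c List.mem_cons_self, hres]
          · have hns : ¬ (j ∈ c :: cs ∧ j % K = i) := by
              rintro ⟨h1, h2⟩
              rcases List.mem_cons.mp h1 with rfl | h1
              · exact hjc rfl
              · exact hmem ⟨h1, h2⟩
            rw [if_neg hjc, if_neg hns]
      · rw [if_neg hres, ih _ hc']
        by_cases hmem : j ∈ cs ∧ j % K = i
        · simp only [if_pos hmem]
          rw [if_pos ⟨List.mem_cons_of_mem _ hmem.1, hmem.2⟩]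
        · have hns : ¬ (j ∈ c :: cs ∧ j % K = i) := by
            rintro ⟨h1, h2⟩
            rcases List.mem_cons.mp h1 with rfl | h1
            · exact hres h2
            · exact hmem ⟨h1, h2⟩
          rw [if_neg hmem, if_neg hns]

-- the inner c-loop distributes over the masks: mask i receives exactly the
-- writes with c % K = i, as a modify of its row r
theorem pvInner_eq (K r : Nat) (cs : List Nat) (ms : List (List (List Int))) :
    cs.foldl (fun ms c =>
        ms.modify (c % K) (fun m => m.modify r (fun row => row.set c 1))) ms
      = ms.mapIdx (fun i m => m.modify r (fun row => pvRowFold K i cs row)) := by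
  induction cs generalizing ms with
  | nil =>
      simp only [List.foldl_nil, pvRowFold, List.foldl_nil]
      apply List.ext_getElem?
      intro j
      rw [List.getElem?_mapIdx]
      cases ms[j]? <;> simp [pvModify_id]
  | cons c cs ih =>
      simp only [List.foldl_cons]
      rw [ih]
      apply List.ext_getElem?
      intro j
      simp only [List.getElem?_mapIdx, List.getElem?_modify]
      cases hm : ms[j]? with
      | none => simp
      | some m =>
          simp only [Option.map_some]
          by_cases hj : c % K = j
          · simp only [if_pos hj, Option.map_some, Option.map_eq_map,
              List.modify_modify_eq]
            simp only [pvRowFold, List.foldl_cons, if_pos hj, Function.comp_def]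
          · simp only [if_neg hj, Option.map_eq_map, Option.map_some, pvRowFold,
              List.foldl_cons, if_neg hj]

-- the outer r-loop over a mapIdx-shaped step distributes per mask
theorem pvOuter_eq (rs : List Nat) (G : Nat → List Int → List Int)
    (ms : List (List (List Int))) :
    rs.foldl (fun ms r => ms.mapIdx (fun i m => m.modify r (G i))) ms
      = ms.mapIdx (fun i m => rs.foldl (fun m r => m.modify r (G i)) m) := by
  induction rs generalizing ms with
  | nil =>
      simp only [List.foldl_nil]
      apply List.ext_getElem?
      intro j
      rw [List.getElem?_mapIdx]
      cases ms[j]? <;> simp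
  | cons r rs ih =>
      simp only [List.foldl_cons]
      rw [ih, List.mapIdx_mapIdx]
      rfl

-- folding modify over a duplicate-free index list, read back elementwise
theorem pvFoldlModify_getElem? {α : Type} (rs : List Nat) (hnd : rs.Nodup)
    (m : List α) (F : α → α) (j : Nat) :
    (rs.foldl (fun m r => m.modify r F) m)[j]? =
      if j ∈ rs then (m[j]?).map F else m[j]? := by
  induction rs generalizing m with
  | nil => simp
  | cons r rs ih =>
      simp only [List.foldl_cons]
      rw [ih (List.Nodup.of_cons hnd)]
      by_cases hmem : j ∈ rs
      · have hne : j ≠ r := by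
          rintro rfl
          exact (List.nodup_cons.mp hnd).1 hmem
        simp [hmem, List.getElem?_modify, Ne.symm hne]
      · by_cases hjr : j = r
        · subst hjr
          simp [hmem, List.getElem?_modify]
        · rw [List.getElem?_modify]
          simp only [if_neg hmem, List.mem_cons, hjr, hmem, or_self, if_false]
          cases m[j]? <;> simp <;> exact fun h => absurd h.symm hjr

-- the whole double loop, started from the k zero masks, in gather form
theorem pvMain (K h w : Nat) :
    (List.range h).foldl (fun masks r =>
        (List.range w).foldl (fun masks c =>
          masks.modify (c % K) (fun m => m.modify r (fun row => row.set c 1))) masks)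
      ((List.range K).map (fun _ => (List.range h).map (fun _ => List.replicate w (0 : Int))))
    = (List.range K).map (fun i => (List.range h).map (fun _ =>
        (List.range w).map (fun c => if c % K = i then (1 : Int) else 0))) := by
  have hstep : (fun (masks : List (List (List Int))) (r : Nat) =>
      (List.range w).foldl (fun masks c =>
        masks.modify (c % K) (fun m => m.modify r (fun row => row.set c 1))) masks)
      = fun masks r => masks.mapIdx
          (fun i m => m.modify r (fun row => pvRowFold K i (List.range w) row)) := by
    funext ms r
    exact pvInner_eq K r (List.range w) ms
  rw [hstep, pvOuter_eq]
  apply List.ext_getElem?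
  intro i
  rw [List.getElem?_mapIdx, List.getElem?_map, List.getElem?_map]
  by_cases hi : i < K
  · rw [List.getElem?_range hi]
    simp only [Option.map_some]
    congr 1
    apply List.ext_getElem?
    intro r
    rw [pvFoldlModify_getElem? _ List.nodup_range, List.getElem?_map, List.getElem?_map]
    by_cases hr : r < h
    · rw [List.getElem?_range hr, if_pos (List.mem_range.mpr hr)]
      simp only [Option.map_some]
      congr 1
      apply List.ext_getElem?
      intro c
      rw [pvRowFold_getElem? _ _ _ _
        (by intro c' hc'; rw [List.length_replicate]; exact List.mem_range.mp hc'),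
        List.getElem?_map]
      by_cases hcw : c < w
      · rw [List.getElem?_range hcw]
        simp only [Option.map_some, List.mem_range, hcw, true_and]
        rw [List.getElem?_replicate]
        split <;> simp [hcw]
      · have h1 : (List.range w)[c]? = none := by
          simp [List.getElem?_eq_none_iff]; omega
        rw [h1]
        have h2 : c ∉ List.range w := by simp; omega
        simp [h2, List.getElem?_replicate, hcw]
    · have h1 : (List.range h)[r]? = none := by
        simp [List.getElem?_eq_none_iff]; omega
      rw [h1]
      simp [List.mem_range, hr]
  · have h1 : (List.range K)[i]? = none := by
      simp [List.getElem?_eq_none_iff]; omega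
    rw [h1]
    simp

-- the unit pattern for residue i, read elementwise below K
theorem pvBase_getElem? (K i j : Nat) (hi : i < K) (hj : j < K) :
    (List.replicate i (0 : Int) ++ 1 :: List.replicate (K - 1 - i) 0)[j]? =
      some (if j = i then 1 else 0) := by
  by_cases h : j < i
  · rw [List.getElem?_append_left (by simpa using h), List.getElem?_replicate,
      if_pos h]
    simp only [Option.some.injEq]
    rw [if_neg (by omega : ¬ j = i)]
  · rw [List.getElem?_append_right (by simp; omega)]
    simp only [List.length_replicate]
    rcases Nat.eq_or_lt_of_le (Nat.le_of_not_lt h) with rfl | hlt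
    · simp
    · have : j - i = (j - i - 1) + 1 := by omega
      rw [this]
      simp only [List.getElem?_cons_succ, List.getElem?_replicate]
      rw [if_pos (by omega)]
      simp only [Option.some.injEq]
      rw [if_neg (by omega : ¬ j = i)]

-- a tiled (flattened replicate) list, read elementwise
theorem pvFlattenReplicate_getElem? {α : Type} (base : List α) (K : Nat)
    (hK : base.length = K) (hK0 : 0 < K) (n c : Nat) :
    ((List.replicate n base).flatten)[c]? =
      if c < n * K then base[c % K]? else none := by
  induction n generalizing c with
  | zero => simp
  | succ n ih =>
      simp only [List.replicate_succ, List.flatten_cons]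
      have hsm : (n + 1) * K = n * K + K := Nat.succ_mul n K
      by_cases h : c < K
      · rw [List.getElem?_append_left (by omega), if_pos (by omega), Nat.mod_eq_of_lt h]
      · rw [List.getElem?_append_right (by omega), hK, ih]
        have hmod : (c - K) % K = c % K := by
          conv_rhs => rw [(by omega : c = K + (c - K))]
          rw [Nat.add_mod_left]
        rw [hmod]
        have heq : c - K < n * K ↔ c < (n + 1) * K := by omega
        simp only [heq]

-- per mask i, A's gather row equals B's tiled-and-truncated row
theorem pvRow_eq (K w i : Nat) (hK0 : 0 < K) (hi : i < K) :
    (List.range w).map (fun c => if c % K = i then (1 : Int) else 0)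
      = ((List.replicate (w / K + 1)
          (List.replicate i (0 : Int) ++ 1 :: List.replicate (K - 1 - i) 0)).flatten).take w := by
  apply List.ext_getElem?
  intro c
  rw [List.getElem?_take, List.getElem?_map]
  by_cases hc : c < w
  · rw [if_pos hc, List.getElem?_range hc,
      pvFlattenReplicate_getElem? _ K (by simp; omega) hK0]
    have hbound : c < (w / K + 1) * K := by
      have h1 := Nat.div_add_mod w K
      have h2 := Nat.mod_lt w hK0
      nlinarith [Nat.succ_mul (w / K) K]
    rw [if_pos hbound, pvBase_getElem? K i (c % K) hi (Nat.mod_lt c hK0)]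
    simp
  · rw [if_neg hc]
    have : (List.range w)[c]? = none := by
      simp [List.getElem?_eq_none_iff]; omega
    simp [this]

theorem colmod_mask_spec : Claim_equal_colmod_mask := by
  intro g k _hdom hpre
  have hK0 : 0 < k.toNat := by
    rcases hpre.2 with rfl | rfl <;> decide
  unfold Spec_colmod_mask
  simp only [colmod_mask, colmod_mask_alt]
  split_ifs with h1 h2 h3
  all_goals first
    | rfl
    | (rw [pvMain k.toNat g.length (g.headD []).length]
       apply List.map_congr_left
       intro i hi
       apply List.map_congr_left
       intro r _
       exact pvRow_eq k.toNat (g.headD []).length i hK0 (List.mem_range.mp hi))
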